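-- pv_equiv track=rewrite | github.com/HaiSeong/algorithm | acmicpc/32518.py | count
-- ===== SOURCE A (Python) =====
-- dp = {}
--
-- def count(n):
--     if n < 3:
--         return 0
--
--     if n in dp:
--         return dp[n]
--
--     cases = []
--
--     if n <= 4:
--         # 2개로 나누는 경우 -> 1명 구출
--         min_chain = (n - 1) // 2
--         if (n - 1) % 2 == 1:
--             cases.append(1 + count(min_chain) + count(min_chain + 1))
--         else:
--             cases.append(1 + count(min_chain) * 2)
--     else:
--         # 3개로 나누는 경우 -> 2명 구출
--         min_chain = (n - 2) // 3
--         if (n - 2) % 3 == 2: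
--             cases.append(2 + count(min_chain) * 2 + count(min_chain + 2) * 1)
--             cases.append(2 + count(min_chain) * 1 + count(min_chain + 1) * 2)
--         elif (n - 2) % 3 == 1:
--             cases.append(2 + count(min_chain) * 2 + count(min_chain + 1) * 1)
--         else:
--             cases.append(2 + count(min_chain) * 3)
--
--     ret = max(cases)
--     dp[n] = ret
--
--     return ret
-- ===== SOURCE B (Python) =====
-- def _quad(m):
--     # (f(m), f(m+1), f(m+2), f(m+3)) for the memo-free recurrence f,
--     # via ONE recursive call on the base window starting at (m-2)//3.
--     if m <= -1:
--         return (0, 0, 0, 0)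
--     b = (m - 2) // 3
--     sub = _quad(b)
--     out = []
--     for v in (m, m + 1, m + 2, m + 3):
--         if v < 3:
--             out.append(0)
--         elif v <= 4:
--             mc = (v - 1) // 2
--             if (v - 1) % 2 == 1:
--                 out.append(1 + sub[mc - b] + sub[mc + 1 - b])
--             else:
--                 out.append(1 + sub[mc - b] * 2)
--         else:
--             mc = (v - 2) // 3
--             r = (v - 2) % 3
--             if r == 2:
--                 out.append(max(2 + sub[mc - b] * 2 + sub[mc + 2 - b],
--                                2 + sub[mc - b] + sub[mc + 1 - b] * 2))
--             elif r == 1: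
--                 out.append(2 + sub[mc - b] * 2 + sub[mc + 1 - b])
--             else:
--                 out.append(2 + sub[mc - b] * 3)
--     return tuple(out)
--
-- def count(n):
--     return _quad(n)[0]
-- ===== Notes on version B (the rewrite author's own statement) =====
-- stated objective: alternative
-- what changed: Replaces the memo-dict recursion with a memo-free tupled recursion: a helper returns a four-wide window of consecutive recurrence values from a single recursive call on the base window, so no dictionary and no repeated subcalls are needed.
import Mathlib
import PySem

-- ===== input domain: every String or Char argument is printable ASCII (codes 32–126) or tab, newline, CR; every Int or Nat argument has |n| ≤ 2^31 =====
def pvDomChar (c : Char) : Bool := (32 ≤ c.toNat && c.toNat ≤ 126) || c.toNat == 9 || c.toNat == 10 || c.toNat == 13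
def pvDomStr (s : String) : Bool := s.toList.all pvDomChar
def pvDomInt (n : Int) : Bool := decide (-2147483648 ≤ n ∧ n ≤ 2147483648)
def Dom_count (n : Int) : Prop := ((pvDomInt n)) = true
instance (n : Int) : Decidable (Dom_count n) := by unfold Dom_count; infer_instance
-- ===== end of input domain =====

-- B replaces A's global memo dict by a memo-free tupled recursion on a 4-wide window (objective: alternative; A's dp mutation is internal memoisation only, invisible in the return value).

-- ===== PORT A =====
-- termination bounds for the ports (used by name in decreasing_by)
lemma pvTermA2a (n : Int) (h : ¬ n < 3) : (PySem.Int.floordiv (n - 1) 2).toNat < n.toNat := by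
  have hlt : PySem.Int.floordiv (n - 1) 2 < n :=
    (PySem.Int.floordiv_lt_iff_lt_mul (by decide)).mpr (by omega)
  exact (Int.toNat_lt_toNat (by omega)).mpr hlt
lemma pvTermA2b (n : Int) (h : ¬ n < 3) : (PySem.Int.floordiv (n - 1) 2 + 1).toNat < n.toNat := by
  have hlt : PySem.Int.floordiv (n - 1) 2 < n - 1 :=
    (PySem.Int.floordiv_lt_iff_lt_mul (by decide)).mpr (by omega)
  exact (Int.toNat_lt_toNat (by omega)).mpr (by omega)
lemma pvTermA3a (n : Int) (h : ¬ n < 3) : (PySem.Int.floordiv (n - 2) 3).toNat < n.toNat := by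
  have hlt : PySem.Int.floordiv (n - 2) 3 < n - 2 :=
    (PySem.Int.floordiv_lt_iff_lt_mul (by decide)).mpr (by omega)
  exact (Int.toNat_lt_toNat (by omega)).mpr (by omega)
lemma pvTermA3b (n : Int) (h : ¬ n < 3) : (PySem.Int.floordiv (n - 2) 3 + 1).toNat < n.toNat := by
  have hlt : PySem.Int.floordiv (n - 2) 3 < n - 2 :=
    (PySem.Int.floordiv_lt_iff_lt_mul (by decide)).mpr (by omega)
  exact (Int.toNat_lt_toNat (by omega)).mpr (by omega)
lemma pvTermA3c (n : Int) (_h : ¬ n < 3) (_h2 : ¬ n ≤ 4) :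
    (PySem.Int.floordiv (n - 2) 3 + 2).toNat < n.toNat := by
  have hlt : PySem.Int.floordiv (n - 2) 3 < n - 2 :=
    (PySem.Int.floordiv_lt_iff_lt_mul (by decide)).mpr (by omega)
  exact (Int.toNat_lt_toNat (by omega)).mpr (by omega)
lemma pvTermQ (m : Int) (h : ¬ m ≤ -1) :
    (PySem.Int.floordiv (m - 2) 3 + 1).toNat < (m + 1).toNat := by
  have hlt : PySem.Int.floordiv (m - 2) 3 < m :=
    (PySem.Int.floordiv_lt_iff_lt_mul (by decide)).mpr (by omega)
  exact (Int.toNat_lt_toNat (by omega)).mpr (by omega)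

def countGo (n : Int) (dp : PySem.Dict Int Int) : Int × PySem.Dict Int Int :=
  if _h1 : n < 3 then (0, dp)
  else
    match dp.get? n with
    | some v => (v, dp)
    | none =>
      let cd : List Int × PySem.Dict Int Int :=
        if _h2 : n ≤ 4 then
          let mc := PySem.Int.floordiv (n - 1) 2
          if PySem.Int.mod (n - 1) 2 = 1 then
            let p1 := countGo mc dp
            let p2 := countGo (mc + 1) p1.2
            ([1 + p1.1 + p2.1], p2.2)
          else
            let p1 := countGo mc dp
            ([1 + p1.1 * 2], p1.2)
        else
          let mc := PySem.Int.floordiv (n - 2) 3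
          if PySem.Int.mod (n - 2) 3 = 2 then
            let p1 := countGo mc dp
            let p2 := countGo (mc + 2) p1.2
            let p3 := countGo mc p2.2
            let p4 := countGo (mc + 1) p3.2
            ([2 + p1.1 * 2 + p2.1 * 1, 2 + p3.1 * 1 + p4.1 * 2], p4.2)
          else if PySem.Int.mod (n - 2) 3 = 1 then
            let p1 := countGo mc dp
            let p2 := countGo (mc + 1) p1.2
            ([2 + p1.1 * 2 + p2.1 * 1], p2.2)
          else
            let p1 := countGo mc dp
            ([2 + p1.1 * 3], p1.2)
      let ret := (PySem.List.max? cd.1 (fun x => x)).getD 0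
      (ret, cd.2.insert n ret)
termination_by n.toNat
decreasing_by
  all_goals
    first
    | exact pvTermA2a n _h1
    | exact pvTermA2b n _h1
    | exact pvTermA3a n _h1
    | exact pvTermA3b n _h1
    | exact pvTermA3c n _h1 _h2

def count (n : Int) : Int := (countGo n PySem.Dict.empty).1

-- ===== PORT B =====
-- tuple indexing sub[i]: i is always 0..3 here
def pick (q : Int × Int × Int × Int) (i : Int) : Int :=
  if i = 0 then q.1 else if i = 1 then q.2.1 else if i = 2 then q.2.2.1 else q.2.2.2

-- loop body of Source B's for-loop: the value appended for v, given the base window sub at b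
def comp (v b : Int) (sub : Int × Int × Int × Int) : Int :=
  if v < 3 then 0
  else if v ≤ 4 then
    let mc := PySem.Int.floordiv (v - 1) 2
    if PySem.Int.mod (v - 1) 2 = 1 then 1 + pick sub (mc - b) + pick sub (mc + 1 - b)
    else 1 + pick sub (mc - b) * 2
  else
    let mc := PySem.Int.floordiv (v - 2) 3
    let r := PySem.Int.mod (v - 2) 3
    if r = 2 then
      max (2 + pick sub (mc - b) * 2 + pick sub (mc + 2 - b))
          (2 + pick sub (mc - b) + pick sub (mc + 1 - b) * 2)
    else if r = 1 then 2 + pick sub (mc - b) * 2 + pick sub (mc + 1 - b)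
    else 2 + pick sub (mc - b) * 3

def quadGo (m : Int) : Int × Int × Int × Int :=
  if _h : m ≤ -1 then (0, 0, 0, 0)
  else
    let b := PySem.Int.floordiv (m - 2) 3
    let sub := quadGo b
    (comp m b sub, comp (m + 1) b sub, comp (m + 2) b sub, comp (m + 3) b sub)
termination_by (m + 1).toNat
decreasing_by
  exact pvTermQ m _h

def count_alt (n : Int) : Int := (quadGo n).1

-- ===== PRECONDITION & SPEC =====
def Spec_count (n : Int) (out : Int) : Prop := out = count_alt n
instance (n : Int) (out : Int) : Decidable (Spec_count n out) := by unfold Spec_count; infer_instance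

-- ===== CLAIM (what is proved, stated in full; the proofs are below) =====
def Claim_equal_count : Prop := ∀ (n : Int), Dom_count n → Spec_count n (count n)

-- ===== LEMMAS AND PROOFS =====

-- the memo-free recurrence both programs compute
def F (n : Int) : Int :=
  if _h1 : n < 3 then 0
  else if _h2 : n ≤ 4 then
    let mc := PySem.Int.floordiv (n - 1) 2
    if PySem.Int.mod (n - 1) 2 = 1 then 1 + F mc + F (mc + 1)
    else 1 + F mc * 2
  else
    let mc := PySem.Int.floordiv (n - 2) 3
    if PySem.Int.mod (n - 2) 3 = 2 then
      max (2 + F mc * 2 + F (mc + 2) * 1) (2 + F mc * 1 + F (mc + 1) * 2)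
    else if PySem.Int.mod (n - 2) 3 = 1 then 2 + F mc * 2 + F (mc + 1) * 1
    else 2 + F mc * 3
termination_by n.toNat
decreasing_by
  all_goals
    first
    | exact pvTermA2a n _h1
    | exact pvTermA2b n _h1
    | exact pvTermA3a n _h1
    | exact pvTermA3b n _h1
    | exact pvTermA3c n _h1 _h2

def MemoInv (d : PySem.Dict Int Int) : Prop := ∀ k v, d.get? k = some v → v = F k

lemma F_neg (n : Int) (h : n < 3) : F n = 0 := by
  rw [F]; simp [h]

lemma memoInv_insert (n ret : Int) (d : PySem.Dict Int Int) (hinv : MemoInv d)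
    (hret : ret = F n) : MemoInv (d.insert n ret) := by
  intro k v hv
  rw [PySem.Dict.get?_insert] at hv
  by_cases hk : k = n
  · rw [if_pos hk] at hv
    injection hv with h
    rw [← h, hret, hk]
  · rw [if_neg hk] at hv
    exact hinv k v hv

lemma countGo_sound (N : Nat) : ∀ (n : Int) (d : PySem.Dict Int Int), n.toNat < N →
    MemoInv d → (countGo n d).1 = F n ∧ MemoInv (countGo n d).2 := by
  induction N with
  | zero => intro n d h; omega
  | succ N ih =>
    intro n d hN hd
    rw [countGo]
    by_cases h1 : n < 3
    · rw [dif_pos h1]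
      exact ⟨(F_neg n h1).symm, hd⟩
    rw [dif_neg h1]
    split
    · next v heq => exact ⟨hd n v heq, hd⟩
    · next heq =>
      by_cases h2 : n ≤ 4
      · have hdv := PySem.Int.floordiv_eq_ediv_of_pos (a := n - 1) (b := 2) (by norm_num)
        rw [dif_pos h2]
        by_cases hp : PySem.Int.mod (n - 1) 2 = 1
        · rw [if_pos hp]
          obtain ⟨e1, i1⟩ := ih (PySem.Int.floordiv (n - 1) 2) d (by omega) hd
          obtain ⟨e2, i2⟩ := ih (PySem.Int.floordiv (n - 1) 2 + 1) _ (by omega) i1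
          simp only [PySem.List.max?_id_cons, List.foldl, Option.getD_some, e1, e2]
          refine ⟨?_, memoInv_insert _ _ _ i2 ?_⟩ <;>
            · conv_rhs => rw [F]
              simp only [dif_neg h1, dif_pos h2, if_pos hp]
        · rw [if_neg hp]
          obtain ⟨e1, i1⟩ := ih (PySem.Int.floordiv (n - 1) 2) d (by omega) hd
          simp only [PySem.List.max?_id_cons, List.foldl, Option.getD_some, e1]
          refine ⟨?_, memoInv_insert _ _ _ i1 ?_⟩ <;>
            · conv_rhs => rw [F]
              simp only [dif_neg h1, dif_pos h2, if_neg hp]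
      · have hdv := PySem.Int.floordiv_eq_ediv_of_pos (a := n - 2) (b := 3) (by norm_num)
        rw [dif_neg h2]
        by_cases hp : PySem.Int.mod (n - 2) 3 = 2
        · rw [if_pos hp]
          obtain ⟨e1, i1⟩ := ih (PySem.Int.floordiv (n - 2) 3) d (by omega) hd
          obtain ⟨e2, i2⟩ := ih (PySem.Int.floordiv (n - 2) 3 + 2) _ (by omega) i1
          obtain ⟨e3, i3⟩ := ih (PySem.Int.floordiv (n - 2) 3) _ (by omega) i2
          obtain ⟨e4, i4⟩ := ih (PySem.Int.floordiv (n - 2) 3 + 1) _ (by omega) i3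
          simp only [PySem.List.max?_id_cons, List.foldl, Option.getD_some, e1, e2, e3, e4]
          refine ⟨?_, memoInv_insert _ _ _ i4 ?_⟩ <;>
            · conv_rhs => rw [F]
              simp only [dif_neg h1, dif_neg h2, if_pos hp]
        · by_cases hq : PySem.Int.mod (n - 2) 3 = 1
          · rw [if_neg hp, if_pos hq]
            obtain ⟨e1, i1⟩ := ih (PySem.Int.floordiv (n - 2) 3) d (by omega) hd
            obtain ⟨e2, i2⟩ := ih (PySem.Int.floordiv (n - 2) 3 + 1) _ (by omega) i1
            simp only [PySem.List.max?_id_cons, List.foldl, Option.getD_some, e1, e2]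
            refine ⟨?_, memoInv_insert _ _ _ i2 ?_⟩ <;>
              · conv_rhs => rw [F]
                simp only [dif_neg h1, dif_neg h2, if_neg hp, if_pos hq]
          · rw [if_neg hp, if_neg hq]
            obtain ⟨e1, i1⟩ := ih (PySem.Int.floordiv (n - 2) 3) d (by omega) hd
            simp only [PySem.List.max?_id_cons, List.foldl, Option.getD_some, e1]
            refine ⟨?_, memoInv_insert _ _ _ i1 ?_⟩ <;>
              · conv_rhs => rw [F]
                simp only [dif_neg h1, dif_neg h2, if_neg hp, if_neg hq]

lemma pick_window (b k : Int) (h1 : b ≤ k) (h2 : k ≤ b + 3) :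
    pick (F b, F (b + 1), F (b + 2), F (b + 3)) (k - b) = F k := by
  have : k - b = 0 ∨ k - b = 1 ∨ k - b = 2 ∨ k - b = 3 := by omega
  rcases this with h | h | h | h <;>
    (have hk : k = b + (k - b) := by omega
     rw [h] at hk; subst hk; simp [pick])

lemma comp_eq (m v b : Int) (_hm : 0 ≤ m) (hv1 : m ≤ v) (hv2 : v ≤ m + 3)
    (hb : b = PySem.Int.floordiv (m - 2) 3) :
    comp v b (F b, F (b + 1), F (b + 2), F (b + 3)) = F v := by
  have hbe : b = (m - 2) / 3 := by
    rw [hb, PySem.Int.floordiv_eq_ediv_of_pos (by norm_num)]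
  simp only [comp]
  by_cases h1 : v < 3
  · rw [if_pos h1, F_neg v h1]
  rw [if_neg h1]
  by_cases h2 : v ≤ 4
  · have hdv := PySem.Int.floordiv_eq_ediv_of_pos (a := v - 1) (b := 2) (by norm_num)
    have hmo := PySem.Int.mod_eq_emod_of_pos (a := v - 1) (b := 2) (by norm_num)
    rw [if_pos h2]
    by_cases hp : PySem.Int.mod (v - 1) 2 = 1
    · rw [if_pos hp,
        pick_window b _ (by omega) (by omega), pick_window b _ (by omega) (by omega)]
      conv_rhs => rw [F]
      simp only [dif_neg h1, dif_pos h2, if_pos hp]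
    · rw [if_neg hp, pick_window b _ (by omega) (by omega)]
      conv_rhs => rw [F]
      simp only [dif_neg h1, dif_pos h2, if_neg hp]
  · have hdv := PySem.Int.floordiv_eq_ediv_of_pos (a := v - 2) (b := 3) (by norm_num)
    have hmo := PySem.Int.mod_eq_emod_of_pos (a := v - 2) (b := 3) (by norm_num)
    rw [if_neg h2]
    by_cases hp : PySem.Int.mod (v - 2) 3 = 2
    · rw [if_pos hp,
        pick_window b _ (by omega) (by omega), pick_window b _ (by omega) (by omega),
        pick_window b _ (by omega) (by omega)]
      conv_rhs => rw [F]
      simp only [dif_neg h1, dif_neg h2, if_pos hp, mul_one]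
    · by_cases hq : PySem.Int.mod (v - 2) 3 = 1
      · rw [if_neg hp, if_pos hq,
          pick_window b _ (by omega) (by omega), pick_window b _ (by omega) (by omega)]
        conv_rhs => rw [F]
        simp only [dif_neg h1, dif_neg h2, if_neg hp, if_pos hq, mul_one]
      · rw [if_neg hp, if_neg hq, pick_window b _ (by omega) (by omega)]
        conv_rhs => rw [F]
        simp only [dif_neg h1, dif_neg h2, if_neg hp, if_neg hq]

lemma quadGo_eq (N : Nat) : ∀ (m : Int), (m + 1).toNat < N →
    quadGo m = (F m, F (m + 1), F (m + 2), F (m + 3)) := by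
  induction N with
  | zero => intro m h; omega
  | succ N ih =>
    intro m hN
    rw [quadGo]
    by_cases h : m ≤ -1
    · rw [dif_pos h]
      rw [F_neg m (by omega), F_neg (m + 1) (by omega), F_neg (m + 2) (by omega),
        F_neg (m + 3) (by omega)]
    · have hdv := PySem.Int.floordiv_eq_ediv_of_pos (a := m - 2) (b := 3) (by norm_num)
      rw [dif_neg h]
      have hsub := ih (PySem.Int.floordiv (m - 2) 3) (by omega)
      simp only [hsub]
      rw [comp_eq m m _ (by omega) (by omega) (by omega) rfl,
        comp_eq m (m + 1) _ (by omega) (by omega) (by omega) rfl,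
        comp_eq m (m + 2) _ (by omega) (by omega) (by omega) rfl,
        comp_eq m (m + 3) _ (by omega) (by omega) (by omega) rfl]

-- ===== VERDICT (by name: the statement is the Claim_ definition above) =====
theorem count_spec : Claim_equal_count := by
  intro n _
  unfold Spec_count count count_alt
  have hA := (countGo_sound (n.toNat + 1) n PySem.Dict.empty (by omega)
    (by intro k v hv; simp [PySem.Dict.get?_empty] at hv)).1
  have hB := quadGo_eq ((n + 1).toNat + 1) n (by omega)
  rw [hA, hB]
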